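-- pv_equiv track=rewrite | github.com/huxiaosir/RL-Group | mah_tool/suphx_extract_features/tool.py | get_comm_single_card
-- ===== SOURCE A (Python) =====
-- import copy
--
-- def get_comm_single_card(handcards):  # 获取孤张，一张牌跟他相邻2以内都没有牌，则作为孤张
--     '''
--     获取平胡孤张 一张牌跟他相邻2以内都没有牌，则作为孤张
--     :param handcards: 手牌用十进制表示
--     :return: 孤张列表
--     '''
--
--     def is_single_card(card, handcards):
--         if card - 1 in handcards or card - 2 in handcards or card + 1 in handcards or card + 2 in handcards:
--             return False
--         else:
--             return True
--
--     single_cards = []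
--     temp_handcards = copy.deepcopy(handcards)
--     L = set(temp_handcards)
--     for card in L:
--         if handcards.count(card) == 1:  # 需要判断前后两张内是否有牌
--             if card & 0xF0 != 0x30:
--                 if is_single_card(card, handcards):
--                     single_cards.append(card)
--             else:
--                 single_cards.append(card)
--     single_cards.sort()
--     return single_cards
-- ===== SOURCE B (Python) =====
-- def get_comm_single_card(handcards):  # 获取孤张，一张牌跟他相邻2以内都没有牌，则作为孤张
--     '''
--     获取平胡孤张 一张牌跟他相邻2以内都没有牌，则作为孤张
--     :param handcards: 手牌用十进制表示
--     :return: 孤张列表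
--     '''
--     s = sorted(handcards)
--     n = len(s)
--     single_cards = []
--     prev = None  # closest distinct smaller value seen so far
--     i = 0
--     while i < n:
--         v = s[i]
--         j = i + 1
--         while j < n and s[j] == v:  # skip the run of duplicates of v
--             j += 1
--         if j == i + 1:  # v occurs exactly once
--             if v & 0xF0 == 0x30 or \
--                ((prev is None or v - prev > 2) and (j == n or s[j] - v > 2)):
--                 single_cards.append(v)
--         prev = v
--         i = j
--     return single_cards  # already ascending: no final sort needed
-- ===== Notes on version B (the rewrite author's own statement) =====
-- stated objective: alternative
-- what changed: Replaces the set + per-card membership/count scans with one ascending sort followed by a single grouped scan that tracks the closest distinct smaller neighbor and peeks at the next distinct value, emitting results already sorted so the final sort disappears.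
import Mathlib
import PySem

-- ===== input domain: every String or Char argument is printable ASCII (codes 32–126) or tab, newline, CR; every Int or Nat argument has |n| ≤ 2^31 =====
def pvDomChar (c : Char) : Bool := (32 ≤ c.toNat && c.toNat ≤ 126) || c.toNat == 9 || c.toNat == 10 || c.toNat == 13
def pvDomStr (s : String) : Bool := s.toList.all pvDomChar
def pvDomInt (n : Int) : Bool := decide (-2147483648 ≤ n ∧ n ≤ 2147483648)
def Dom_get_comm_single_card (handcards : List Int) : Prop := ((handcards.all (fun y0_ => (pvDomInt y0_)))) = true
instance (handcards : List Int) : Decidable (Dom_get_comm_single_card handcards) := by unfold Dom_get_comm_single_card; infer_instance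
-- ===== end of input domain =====

-- B replaces A's set + per-card membership/count scans by one ascending sort and a single
-- grouped scan tracking the closest distinct neighbors (alternative algorithm).

-- ===== PORT A =====
def pvIsSingleCard (card : Int) (handcards : List Int) : Bool :=
  if (card - 1) ∈ handcards ∨ (card - 2) ∈ handcards ∨ (card + 1) ∈ handcards ∨ (card + 2) ∈ handcards then
    false
  else
    true

def get_comm_single_card (handcards : List Int) : List Int :=
  let temp_handcards := handcards   -- copy.deepcopy(handcards)
  let L := PySem.Set.ofList temp_handcards
  let single_cards := L.foldl (fun acc card =>
    if PySem.List.count handcards card = 1 then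
      if PySem.Int.band card 240 ≠ 48 then
        (if pvIsSingleCard card handcards then acc ++ [card] else acc)
      else acc ++ [card]
    else acc) []
  PySem.List.sorted single_cards (fun x => x) false

-- ===== PORT B =====
-- the inner "while s[j] == v" duplicate-skipping scan is ported as takeWhile/dropWhile on the tail
def altGo (prev : Option Int) : List Int → List Int
  | [] => []
  | v :: s' =>
    let rest := s'.dropWhile (fun x => x == v)
    let keep := (s'.takeWhile (fun x => x == v)).isEmpty &&
      ((PySem.Int.band v 240 == 48) ||
        ((match prev with | none => true | some p => decide (v - p > 2)) &&
         (match rest.head? with | none => true | some h => decide (h - v > 2))))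
    if keep then v :: altGo (some v) rest else altGo (some v) rest
termination_by s => s.length
decreasing_by
  all_goals
    exact Nat.lt_succ_of_le (List.length_dropWhile_le _ _)

def get_comm_single_card_alt (handcards : List Int) : List Int :=
  altGo none (PySem.List.sorted handcards (fun x => x) false)

-- ===== PRECONDITION & SPEC =====
def Spec_get_comm_single_card (handcards : List Int) (out : List Int) : Prop := out = get_comm_single_card_alt handcards
instance (handcards : List Int) (out : List Int) : Decidable (Spec_get_comm_single_card handcards out) := by unfold Spec_get_comm_single_card; infer_instance

-- ===== CLAIM (what is proved, stated in full; the proofs are below) =====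
def Claim_equal_get_comm_single_card : Prop := ∀ (handcards : List Int), Dom_get_comm_single_card handcards → Spec_get_comm_single_card handcards (get_comm_single_card handcards)

-- ===== LEMMAS AND PROOFS =====

-- the common predicate: card v of hc is an isolated single
def pvPred (hc : List Int) (v : Int) : Prop :=
  hc.count v = 1 ∧
    (PySem.Int.band v 240 = 48 ∨
      ((v - 1) ∉ hc ∧ (v - 2) ∉ hc ∧ (v + 1) ∉ hc ∧ (v + 2) ∉ hc))

def pvPredDec (hc : List Int) (v : Int) : Decidable (pvPred hc v) := by unfold pvPred; infer_instance

theorem pvFoldA (hc L acc : List Int) :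
    L.foldl (fun acc card =>
      if PySem.List.count hc card = 1 then
        if PySem.Int.band card 240 ≠ 48 then
          (if pvIsSingleCard card hc then acc ++ [card] else acc)
        else acc ++ [card]
      else acc) acc = acc ++ L.filter (fun c => @decide (pvPred hc c) (pvPredDec hc c)) := by
  letI : ∀ v, Decidable (pvPred hc v) := pvPredDec hc
  induction L generalizing acc with
  | nil => simp
  | cons c t ih =>
    simp only [List.foldl_cons, List.filter_cons, ih]
    have hbranch :
        (if PySem.List.count hc c = 1 then
          if PySem.Int.band c 240 ≠ 48 then
            (if pvIsSingleCard c hc then acc ++ [c] else acc)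
          else acc ++ [c]
        else acc) = if pvPred hc c then acc ++ [c] else acc := by
      simp only [pvPred, pvIsSingleCard, PySem.List.count_eq]
      by_cases h1 : hc.count c = 1 <;> by_cases h2 : PySem.Int.band c 240 = 48 <;>
        by_cases h3 : (c - 1) ∈ hc ∨ (c - 2) ∈ hc ∨ (c + 1) ∈ hc ∨ (c + 2) ∈ hc <;>
        simp [h1, h2, h3] <;> tauto
    rw [hbranch]
    by_cases hp : pvPred hc c <;> simp [hp]

theorem pvA_eq (hc : List Int) :
    get_comm_single_card hc =
      PySem.List.sorted ((PySem.Set.ofList hc).filter (fun c => @decide (pvPred hc c) (pvPredDec hc c)))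
        (fun x => x) false := by
  simp only [get_comm_single_card]
  rw [pvFoldA hc _ []]
  simp

-- last element of a ≤-sorted list is an upper bound
theorem pvLe_getLast? (l : List Int) (hl : l.Pairwise (· ≤ ·)) (x : Int) (hx : x ∈ l) :
    ∃ p, l.getLast? = some p ∧ x ≤ p := by
  have hne : l ≠ [] := List.ne_nil_of_mem hx
  exact ⟨l.getLast hne, List.getLast?_eq_some_getLast hne, hl.rel_getLast hx⟩

theorem pvGetLast?_const (v : Int) (l : List Int) (h : ∀ x ∈ l, x = v) :
    (v :: l).getLast? = some v := by
  induction l with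
  | nil => rfl
  | cons a t ih =>
    have ha : a = v := h a (by simp)
    rw [List.getLast?_cons_cons]
    subst ha
    exact ih (fun x hx => h x (by simp [hx]))

-- head of a ≤-sorted list is a lower bound
theorem pvHead?_le (l : List Int) (hl : l.Pairwise (· ≤ ·)) (x : Int) (hx : x ∈ l) :
    ∃ h, l.head? = some h ∧ h ≤ x := by
  cases l with
  | nil => cases hx
  | cons a t =>
    refine ⟨a, rfl, ?_⟩
    rcases List.mem_cons.mp hx with rfl | hx
    · exact le_refl _
    · exact (List.pairwise_cons.mp hl).1 x hx

-- two strictly increasing lists with the same members are equal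
theorem pvEq_of_lt_of_mem (l₁ : List Int) : ∀ (l₂ : List Int), l₁.Pairwise (· < ·) →
    l₂.Pairwise (· < ·) → (∀ v, v ∈ l₁ ↔ v ∈ l₂) → l₁ = l₂ := by
  induction l₁ with
  | nil =>
    intro l₂ _ _ hm
    cases l₂ with
    | nil => rfl
    | cons b t => exact absurd ((hm b).mpr (by simp)) (by simp)
  | cons a t ih =>
    intro l₂ h₁ h₂ hm
    cases l₂ with
    | nil => exact absurd ((hm a).mp (by simp)) (by simp)
    | cons b t₂ =>
      have hab : a = b := by
        have ha : a ∈ b :: t₂ := (hm a).mp (by simp)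
        have hb : b ∈ a :: t := (hm b).mpr (by simp)
        rcases List.mem_cons.mp ha with h | h
        · exact h
        · have hba : b < a := (List.pairwise_cons.mp h₂).1 a h
          rcases List.mem_cons.mp hb with h' | h'
          · omega
          · have := (List.pairwise_cons.mp h₁).1 b h'
            omega
      subst hab
      have ht : ∀ v, v ∈ t ↔ v ∈ t₂ := by
        intro v
        constructor
        · intro hv
          have hav : a < v := (List.pairwise_cons.mp h₁).1 v hv
          rcases List.mem_cons.mp ((hm v).mp (by simp [hv])) with h | h
          · omega
          · exact h
        · intro hv
          have hav : a < v := (List.pairwise_cons.mp h₂).1 v hv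
          rcases List.mem_cons.mp ((hm v).mpr (by simp [hv])) with h | h
          · omega
          · exact h
      rw [ih t₂ h₁.of_cons h₂.of_cons ht]

-- main characterisation of the grouped scan: on a sorted suffix s of the full sorted hand
-- (lower = the part already consumed), altGo returns exactly the isolated singles of s, ascending
theorem pvAltGo_char (n : Nat) : ∀ (s lower : List Int), s.length ≤ n →
    (lower ++ s).Pairwise (· ≤ ·) →
    (∀ x ∈ lower, ∀ y ∈ s, x < y) →
    (altGo lower.getLast? s).Pairwise (· < ·) ∧
      ∀ v, v ∈ altGo lower.getLast? s ↔ v ∈ s ∧ pvPred (lower ++ s) v := by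
  induction n with
  | zero =>
    intro s lower hlen _ _
    have hnil : s = [] := List.eq_nil_of_length_eq_zero (Nat.le_zero.mp hlen)
    subst hnil
    simp [altGo]
  | succ n ih =>
    intro s lower hlen hs hlt
    cases s with
    | nil => simp [altGo]
    | cons v s' =>
      have hs0 := hs
      have hdup_v : ∀ x ∈ s'.takeWhile (fun x => x == v), x = v := by
        intro x hx
        simpa using List.mem_takeWhile_imp hx
      have hsplit : s'.takeWhile (fun x => x == v) ++ s'.dropWhile (fun x => x == v) = s' :=
        List.takeWhile_append_dropWhile
      rw [List.pairwise_append] at hs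
      obtain ⟨hlow_pw, hs_pw, _⟩ := hs
      have hv_le : ∀ y ∈ s', v ≤ y := (List.pairwise_cons.mp hs_pw).1
      have hs'_pw : s'.Pairwise (· ≤ ·) := (List.pairwise_cons.mp hs_pw).2
      have hrest_pw : (s'.dropWhile (fun x => x == v)).Pairwise (· ≤ ·) :=
        hs'_pw.sublist (List.dropWhile_sublist _)
      have hrest_gt : ∀ y ∈ s'.dropWhile (fun x => x == v), v < y := by
        intro y hy
        have hmem : y ∈ s' := (List.dropWhile_sublist _).subset hy
        obtain ⟨h, hh, hhy⟩ := pvHead?_le _ hrest_pw y hy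
        have hpf : (h == v) = false := by
          have := List.head?_dropWhile_not (fun x => x == v) s'
          rw [hh] at this
          exact this
        have hhv : h ≠ v := by simpa using hpf
        have hhmem : h ∈ s' := (List.dropWhile_sublist _).subset (List.mem_of_mem_head? hh)
        have := hv_le h hhmem
        omega
      have hlow_lt : ∀ x ∈ lower, x < v := fun x hx => hlt x hx v (by simp)
      have hcount_low : lower.count v = 0 := by
        rw [List.count_eq_zero]
        intro hmem
        exact lt_irrefl v (hlow_lt v hmem)
      have hcount_dup : (s'.takeWhile (fun x => x == v)).count v =
          (s'.takeWhile (fun x => x == v)).length :=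
        List.count_eq_length.mpr (fun b hb => (hdup_v b hb).symm)
      have hcount_rest : (s'.dropWhile (fun x => x == v)).count v = 0 := by
        rw [List.count_eq_zero]
        intro hmem
        exact lt_irrefl v (hrest_gt v hmem)
      have hcount_s' : s'.count v = (s'.takeWhile (fun x => x == v)).length := by
        conv_lhs => rw [← hsplit]
        rw [List.count_append, hcount_dup, hcount_rest]
        omega
      have hcount_full : (lower ++ v :: s').count v =
          1 + (s'.takeWhile (fun x => x == v)).length := by
        rw [List.count_append, hcount_low, List.count_cons_self, hcount_s']
        omega
      have hbelow : ∀ w : Int, w < v → ((w ∈ lower ++ v :: s') ↔ w ∈ lower) := by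
        intro w hw
        simp only [List.mem_append, List.mem_cons]
        constructor
        · rintro (h | h | h)
          · exact h
          · omega
          · exact absurd (hv_le w h) (by omega)
        · exact Or.inl
      have habove : ∀ w : Int, v < w →
          ((w ∈ lower ++ v :: s') ↔ w ∈ s'.dropWhile (fun x => x == v)) := by
        intro w hw
        simp only [List.mem_append, List.mem_cons]
        constructor
        · rintro (h | h | h)
          · exact absurd (hlow_lt w h) (by omega)
          · omega
          · rw [← hsplit] at h
            rcases List.mem_append.mp h with h | h
            · exact absurd (hdup_v w h) (by omega)
            · exact h
        · intro h
          right; right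
          rw [← hsplit]
          exact List.mem_append.mpr (Or.inr h)
      have hprev : ((match lower.getLast? with
            | none => true | some p => decide (v - p > 2)) = true)
          ↔ ((v - 1) ∉ lower ++ v :: s' ∧ (v - 2) ∉ lower ++ v :: s') := by
        rw [hbelow (v - 1) (by omega), hbelow (v - 2) (by omega)]
        cases hgl : lower.getLast? with
        | none =>
          have hnil : lower = [] := List.getLast?_eq_none_iff.mp hgl
          subst hnil
          simp
        | some p =>
          have hp_mem : p ∈ lower := List.mem_of_getLast? hgl
          have hp_lt : p < v := hlow_lt p hp_mem
          simp only [decide_eq_true_eq]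
          constructor
          · intro hgt
            constructor
            · intro hmem
              obtain ⟨q, hq, hle⟩ := pvLe_getLast? lower hlow_pw _ hmem
              rw [hgl] at hq
              injection hq with hq
              omega
            · intro hmem
              obtain ⟨q, hq, hle⟩ := pvLe_getLast? lower hlow_pw _ hmem
              rw [hgl] at hq
              injection hq with hq
              omega
          · rintro ⟨h1, h2⟩
            by_contra hle
            have : p = v - 1 ∨ p = v - 2 := by omega
            rcases this with rfl | rfl
            · exact h1 hp_mem
            · exact h2 hp_mem
      have hnext : ((match (s'.dropWhile (fun x => x == v)).head? with
            | none => true | some h => decide (h - v > 2)) = true)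
          ↔ ((v + 1) ∉ lower ++ v :: s' ∧ (v + 2) ∉ lower ++ v :: s') := by
        rw [habove (v + 1) (by omega), habove (v + 2) (by omega)]
        cases hhd : (s'.dropWhile (fun x => x == v)).head? with
        | none =>
          have hnil : s'.dropWhile (fun x => x == v) = [] := List.head?_eq_none_iff.mp hhd
          rw [hnil]
          simp
        | some h =>
          have hh_mem : h ∈ s'.dropWhile (fun x => x == v) := List.mem_of_mem_head? hhd
          have hh_gt : v < h := hrest_gt h hh_mem
          simp only [decide_eq_true_eq]
          constructor
          · intro hgt
            constructor
            · intro hmem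
              obtain ⟨q, hq, hle⟩ := pvHead?_le _ hrest_pw _ hmem
              rw [hhd] at hq
              injection hq with hq
              omega
            · intro hmem
              obtain ⟨q, hq, hle⟩ := pvHead?_le _ hrest_pw _ hmem
              rw [hhd] at hq
              injection hq with hq
              omega
          · rintro ⟨h1, h2⟩
            by_contra hle
            have : h = v + 1 ∨ h = v + 2 := by omega
            rcases this with rfl | rfl
            · exact h1 hh_mem
            · exact h2 hh_mem
      have hdup_iff : ((s'.takeWhile (fun x => x == v)).isEmpty = true)
          ↔ ((lower ++ v :: s').count v = 1) := by
        rw [hcount_full, List.isEmpty_iff, ← List.length_eq_zero_iff]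
        omega
      have hkeep_iff : (((s'.takeWhile (fun x => x == v)).isEmpty &&
            ((PySem.Int.band v 240 == 48) ||
              ((match lower.getLast? with
                | none => true | some p => decide (v - p > 2)) &&
               (match (s'.dropWhile (fun x => x == v)).head? with
                | none => true | some h => decide (h - v > 2))))) = true)
          ↔ pvPred (lower ++ v :: s') v := by
        rw [Bool.and_eq_true, Bool.or_eq_true, Bool.and_eq_true, hdup_iff, hprev, hnext,
          beq_iff_eq]
        unfold pvPred
        tauto
      have hlen' : (s'.dropWhile (fun x => x == v)).length ≤ n := by
        have h1 : (s'.dropWhile (fun x => x == v)).length ≤ s'.length :=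
          List.length_dropWhile_le _ _
        simp only [List.length_cons] at hlen
        omega
      have hfull_eq : (lower ++ v :: s'.takeWhile (fun x => x == v)) ++
          s'.dropWhile (fun x => x == v) = lower ++ v :: s' := by
        rw [List.append_assoc, List.cons_append, hsplit]
      have hglast : (lower ++ v :: s'.takeWhile (fun x => x == v)).getLast? = some v := by
        rw [List.getLast?_append_of_ne_nil lower (by simp), pvGetLast?_const v _ hdup_v]
      have hpw' : ((lower ++ v :: s'.takeWhile (fun x => x == v)) ++
          s'.dropWhile (fun x => x == v)).Pairwise (· ≤ ·) := by
        rw [hfull_eq]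
        exact hs0
      have hlt' : ∀ x ∈ lower ++ v :: s'.takeWhile (fun x => x == v),
          ∀ y ∈ s'.dropWhile (fun x => x == v), x < y := by
        intro x hx y hy
        rcases List.mem_append.mp hx with h | h
        · exact hlt x h y (List.mem_cons_of_mem v ((List.dropWhile_sublist _).subset hy))
        · rcases List.mem_cons.mp h with rfl | h
          · exact hrest_gt y hy
          · rw [hdup_v x h]
            exact hrest_gt y hy
      obtain ⟨ihpw, ihmem⟩ := ih (s'.dropWhile (fun x => x == v))
        (lower ++ v :: s'.takeWhile (fun x => x == v)) hlen' hpw' hlt'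
      rw [hglast] at ihpw ihmem
      rw [hfull_eq] at ihmem
      rw [altGo.eq_def]
      dsimp only
      by_cases hkeep : pvPred (lower ++ v :: s') v
      · rw [if_pos (hkeep_iff.mpr hkeep)]
        constructor
        · exact List.pairwise_cons.mpr
            ⟨fun y hy => hrest_gt y ((ihmem y).mp hy).1, ihpw⟩
        · intro u
          rw [List.mem_cons, ihmem u]
          constructor
          · rintro (rfl | ⟨hu, hp⟩)
            · exact ⟨by simp, hkeep⟩
            · refine ⟨List.mem_cons_of_mem _ ?_, hp⟩
              rw [← hsplit]
              exact List.mem_append.mpr (Or.inr hu)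
          · rintro ⟨hu, hp⟩
            by_cases huv : u = v
            · exact Or.inl huv
            · right
              rcases List.mem_cons.mp hu with h | h
              · exact absurd h huv
              · rw [← hsplit] at h
                rcases List.mem_append.mp h with h | h
                · exact absurd (hdup_v u h) huv
                · exact ⟨h, hp⟩
      · rw [if_neg (fun h => hkeep (hkeep_iff.mp h))]
        constructor
        · exact ihpw
        · intro u
          rw [ihmem u]
          constructor
          · rintro ⟨hu, hp⟩
            refine ⟨List.mem_cons_of_mem _ ?_, hp⟩
            rw [← hsplit]
            exact List.mem_append.mpr (Or.inr hu)
          · rintro ⟨hu, hp⟩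
            by_cases huv : u = v
            · subst huv
              exact absurd hp hkeep
            · rcases List.mem_cons.mp hu with h | h
              · exact absurd h huv
              · rw [← hsplit] at h
                rcases List.mem_append.mp h with h | h
                · exact absurd (hdup_v u h) huv
                · exact ⟨h, hp⟩

theorem pvB_char (hc : List Int) :
    (get_comm_single_card_alt hc).Pairwise (· < ·) ∧
      ∀ v, v ∈ get_comm_single_card_alt hc ↔ v ∈ hc ∧ pvPred hc v := by
  have hperm : (PySem.List.sorted hc (fun x => x) false).Perm hc := PySem.List.sorted_perm _ _ _
  have hsorted : (PySem.List.sorted hc (fun x => x) false).Pairwise (· ≤ ·) :=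
    PySem.List.sorted_pairwise hc (fun x => x)
  have := pvAltGo_char (PySem.List.sorted hc (fun x => x) false).length
    (PySem.List.sorted hc (fun x => x) false) [] (le_refl _)
    (by simpa using hsorted) (by simp)
  simp only [List.getLast?_nil, List.nil_append] at this
  refine ⟨this.1, fun v => ?_⟩
  rw [get_comm_single_card_alt, this.2 v]
  unfold pvPred
  rw [hperm.count_eq]
  simp [hperm.mem_iff]

theorem pvA_char (hc : List Int) :
    (get_comm_single_card hc).Pairwise (· < ·) ∧
      ∀ v, v ∈ get_comm_single_card hc ↔ v ∈ hc ∧ pvPred hc v := by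
  rw [pvA_eq]
  set f := fun c => @decide (pvPred hc c) (pvPredDec hc c) with hf
  have hperm : (PySem.List.sorted ((PySem.Set.ofList hc).filter f) (fun x => x) false).Perm
      ((PySem.Set.ofList hc).filter f) := PySem.List.sorted_perm _ _ _
  constructor
  · have hle : (PySem.List.sorted ((PySem.Set.ofList hc).filter f) (fun x => x) false).Pairwise (· ≤ ·) :=
      PySem.List.sorted_pairwise _ _
    have hnd : (PySem.List.sorted ((PySem.Set.ofList hc).filter f) (fun x => x) false).Nodup :=
      hperm.nodup_iff.mpr ((PySem.Set.nodup_ofList hc).filter f)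
    have := hle.and hnd
    exact this.imp (by intro a b h; rcases h with ⟨h1, h2⟩; omega)
  · intro v
    rw [hperm.mem_iff, List.mem_filter]
    simp [hf, PySem.Set.mem_ofList]

-- ===== VERDICT (by name: the statement is the Claim_ definition above) =====
theorem get_comm_single_card_spec : Claim_equal_get_comm_single_card := by
  intro hc _
  show get_comm_single_card hc = get_comm_single_card_alt hc
  obtain ⟨ha1, ha2⟩ := pvA_char hc
  obtain ⟨hb1, hb2⟩ := pvB_char hc
  exact pvEq_of_lt_of_mem _ _ ha1 hb1 (fun v => by rw [ha2 v, hb2 v])
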